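-- pv_equiv track=rewrite | github.com/eddieteall/ADSassignment | q7.py | best_pivot
-- ===== SOURCE A (Python) =====
-- def best_pivot(L,p1,p2,p3):
--     def balance(p):
--         left=0
--         right=0
--         for x in L:
--             if x<p:
--                 left+=1
--             elif x>p:
--                 right+=1
--         return abs(left-right)
--
--     best=p1
--     best_diff=balance(p1)
--
--     for p in [p2,p3]:
--         diff=balance(p)
--         if diff<best_diff:
--             best=p
--             best_diff=diff
--     return best
-- ===== SOURCE B (Python) =====
-- def best_pivot(L, p1, p2, p3):
--     # One pass over L maintaining (left, right) counters for all three pivots at once.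
--     l1 = r1 = l2 = r2 = l3 = r3 = 0
--     for x in L:
--         if x < p1:
--             l1 += 1
--         elif x > p1:
--             r1 += 1
--         if x < p2:
--             l2 += 1
--         elif x > p2:
--             r2 += 1
--         if x < p3:
--             l3 += 1
--         elif x > p3:
--             r3 += 1
--     d1 = abs(l1 - r1)
--     d2 = abs(l2 - r2)
--     d3 = abs(l3 - r3)
--     if d1 <= d2 and d1 <= d3:
--         return p1
--     elif d2 <= d3:
--         return p2
--     else:
--         return p3
-- ===== Notes on version B (the rewrite author's own statement) =====
-- stated objective: alternative
-- what changed: B makes a single pass over L maintaining left/right counters for all three pivots simultaneously and then picks the earliest pivot with minimal imbalance via a direct comparison chain, instead of A's three separate full scans plus a best-so-far loop.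
import Mathlib
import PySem

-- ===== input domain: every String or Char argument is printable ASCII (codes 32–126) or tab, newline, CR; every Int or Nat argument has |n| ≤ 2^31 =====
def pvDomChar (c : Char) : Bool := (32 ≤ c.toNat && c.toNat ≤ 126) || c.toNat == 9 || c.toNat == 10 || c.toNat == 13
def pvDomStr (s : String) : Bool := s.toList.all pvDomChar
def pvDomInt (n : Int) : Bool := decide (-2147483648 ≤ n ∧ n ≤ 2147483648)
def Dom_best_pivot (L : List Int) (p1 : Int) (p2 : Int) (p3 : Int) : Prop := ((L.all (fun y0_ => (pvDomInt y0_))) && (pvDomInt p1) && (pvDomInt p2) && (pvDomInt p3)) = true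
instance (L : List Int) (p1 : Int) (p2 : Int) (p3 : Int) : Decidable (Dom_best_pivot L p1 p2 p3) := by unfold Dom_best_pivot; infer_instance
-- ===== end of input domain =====

-- B replaces A's three full scans with ONE pass keeping counters for all three pivots at once, then a direct comparison chain (alternative structure; measured cost is the same).


-- ===== PORT A =====
-- A's inner helper `balance`: a full pass over L counting elements below / above p.
def pvBalanceA (L : List Int) (p : Int) : Int :=
  let lr := L.foldl (fun (s : Int × Int) x =>
    if x < p then (s.1 + 1, s.2) else if x > p then (s.1, s.2 + 1) else s) (0, 0)
  |lr.1 - lr.2|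

def best_pivot (L : List Int) (p1 : Int) (p2 : Int) (p3 : Int) : Int :=
  let st := [p2, p3].foldl (fun (s : Int × Int) p =>
    let diff := pvBalanceA L p
    if diff < s.2 then (p, diff) else s) (p1, pvBalanceA L p1)
  st.1

-- ===== PORT B =====
-- One pass over L: step updates (l1,r1),(l2,r2),(l3,r3) for the three pivots at once.
def pvStepB (p1 p2 p3 : Int) (s : (Int × Int) × (Int × Int) × (Int × Int)) (x : Int) :
    (Int × Int) × (Int × Int) × (Int × Int) :=
  ((if x < p1 then (s.1.1 + 1, s.1.2) else if x > p1 then (s.1.1, s.1.2 + 1) else s.1),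
   (if x < p2 then (s.2.1.1 + 1, s.2.1.2) else if x > p2 then (s.2.1.1, s.2.1.2 + 1) else s.2.1),
   (if x < p3 then (s.2.2.1 + 1, s.2.2.2) else if x > p3 then (s.2.2.1, s.2.2.2 + 1) else s.2.2))

def best_pivot_alt (L : List Int) (p1 : Int) (p2 : Int) (p3 : Int) : Int :=
  let s := L.foldl (pvStepB p1 p2 p3) (((0, 0), (0, 0), (0, 0)))
  let d1 := |s.1.1 - s.1.2|
  let d2 := |s.2.1.1 - s.2.1.2|
  let d3 := |s.2.2.1 - s.2.2.2|
  if d1 ≤ d2 ∧ d1 ≤ d3 then p1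
  else if d2 ≤ d3 then p2
  else p3

-- ===== PRECONDITION & SPEC =====
def Spec_best_pivot (L : List Int) (p1 : Int) (p2 : Int) (p3 : Int) (out : Int) : Prop := out = best_pivot_alt L p1 p2 p3
instance (L : List Int) (p1 : Int) (p2 : Int) (p3 : Int) (out : Int) : Decidable (Spec_best_pivot L p1 p2 p3 out) := by unfold Spec_best_pivot; infer_instance

-- ===== CLAIM (what is proved, stated in full; the proofs are below) =====
def Claim_equal_best_pivot : Prop := ∀ (L : List Int) (p1 : Int) (p2 : Int) (p3 : Int), Dom_best_pivot L p1 p2 p3 → Spec_best_pivot L p1 p2 p3 (best_pivot L p1 p2 p3)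

-- ===== LEMMAS AND PROOFS =====
-- B's combined fold is the triple of A's three separate folds.
theorem pvFold_split (L : List Int) (p1 p2 p3 : Int)
    (a b c : Int × Int) :
    L.foldl (pvStepB p1 p2 p3) (a, b, c) =
      (L.foldl (fun (s : Int × Int) x =>
          if x < p1 then (s.1 + 1, s.2) else if x > p1 then (s.1, s.2 + 1) else s) a,
       L.foldl (fun (s : Int × Int) x =>
          if x < p2 then (s.1 + 1, s.2) else if x > p2 then (s.1, s.2 + 1) else s) b,
       L.foldl (fun (s : Int × Int) x =>
          if x < p3 then (s.1 + 1, s.2) else if x > p3 then (s.1, s.2 + 1) else s) c) := by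
  induction L generalizing a b c with
  | nil => rfl
  | cons x t ih =>
      simp only [List.foldl_cons, pvStepB]
      rw [ih]

-- ===== VERDICT (by name: the statement is the Claim_ definition above) =====
theorem best_pivot_spec : Claim_equal_best_pivot := by
  intro L p1 p2 p3 _
  show best_pivot L p1 p2 p3 = best_pivot_alt L p1 p2 p3
  unfold best_pivot best_pivot_alt pvBalanceA
  rw [pvFold_split]
  simp only [List.foldl_cons, List.foldl_nil]
  split_ifs <;> first | rfl | omega
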